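-- pv_equiv track=rewrite | github.com/danielespo/Solving-SAT-in-FPGA-UCSB | Python-Code/packing.py | packing_algorithm
-- ===== SOURCE A (Python) =====
-- def packing_algorithm(literal_memberships):
--     """Simple big-small packing algorithm. Sorts one list, then uses elements of sorted list to find elements of
--     another list. Then finds the smallest element, pops both, etc.
--
--     Returns:
--        packed_literal_array: an array of the form [[[literal_a, literal_b], [membership of literal_a, membership of literal_b]], ...]
--        masks: a list of tuples indicating the start and end positions for each literal within the packed array (1-based indexing)
--     """
--     literal_memberships.pop(0)  # Remove 1-based indexing trick
--     num_vars = len(literal_memberships)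
--
--     packed_literal_array = []
--     size_unsorted_arr = [len(i) for i in literal_memberships]
--     size_sorted_arr = sorted(enumerate(size_unsorted_arr), key=lambda x: x[1])
--
--     masks = [(0, 0)] * (num_vars + 1)
--     current_mask_position = 0
--
--     while len(size_sorted_arr) > 1:
--         small_index, current_size_small = size_sorted_arr.pop(0)  # get first
--         small = literal_memberships[small_index]
--
--         big_index, current_size_big = size_sorted_arr.pop()  # get last
--         big = literal_memberships[big_index]
--
--         current_pack_array = [[big_index + 1, small_index + 1], big + small]
--         packed_literal_array.append(current_pack_array)
--
--         masks[big_index + 1] = (current_mask_position, current_mask_position + len(big) - 1)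
--         masks[small_index + 1] = (current_mask_position + len(big), current_mask_position + len(big) + len(small) - 1)
--         current_mask_position += len(big) + len(small)
--
--     if size_sorted_arr:
--         remaining_index, remaining_size = size_sorted_arr.pop()
--         remaining = literal_memberships[remaining_index]
--         packed_literal_array.append([[remaining_index + 1], remaining])
--         masks[remaining_index + 1] = (current_mask_position, current_mask_position + len(remaining) - 1)
--
--     return packed_literal_array, masks
-- ===== SOURCE B (Python) =====
-- def packing_algorithm(literal_memberships):
--     """Two-pointer big-small packing: sort the variable indices by membership size once,
--     then walk the sorted order from both ends instead of popping from a shrinking list.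
--
--     Note: unlike the original, this does not mutate its argument; the RETURN value is identical.
--     """
--     mems = literal_memberships[1:]  # drop the 1-based indexing pad
--     n = len(mems)
--     order = sorted(range(n), key=lambda i: len(mems[i]))
--
--     packed_literal_array = []
--     masks = [(0, 0)] * (n + 1)
--     pos = 0
--     lo, hi = 0, n - 1
--     while lo < hi:
--         small_index = order[lo]
--         big_index = order[hi]
--         small = mems[small_index]
--         big = mems[big_index]
--         packed_literal_array.append([[big_index + 1, small_index + 1], big + small])
--         masks[big_index + 1] = (pos, pos + len(big) - 1)
--         masks[small_index + 1] = (pos + len(big), pos + len(big) + len(small) - 1)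
--         pos += len(big) + len(small)
--         lo += 1
--         hi -= 1
--     if lo == hi:
--         i = order[lo]
--         rem = mems[i]
--         packed_literal_array.append([[i + 1], rem])
--         masks[i + 1] = (pos, pos + len(rem) - 1)
--     return packed_literal_array, masks
-- ===== Notes on version B (the rewrite author's own statement) =====
-- stated objective: alternative
-- what changed: Replaces A's destructive pop(0)/pop() consumption of the sorted (index,size) list with a sorted index array walked once by two pointers from both ends; B also does not mutate its argument (return value identical).
-- crash fix: On the empty list A raises IndexError (pop from empty list) while B returns ([], [(0, 0)]). — e.g. on packing_algorithm([]): A raises IndexError, B returns ([], [(0, 0)])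
import Mathlib
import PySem

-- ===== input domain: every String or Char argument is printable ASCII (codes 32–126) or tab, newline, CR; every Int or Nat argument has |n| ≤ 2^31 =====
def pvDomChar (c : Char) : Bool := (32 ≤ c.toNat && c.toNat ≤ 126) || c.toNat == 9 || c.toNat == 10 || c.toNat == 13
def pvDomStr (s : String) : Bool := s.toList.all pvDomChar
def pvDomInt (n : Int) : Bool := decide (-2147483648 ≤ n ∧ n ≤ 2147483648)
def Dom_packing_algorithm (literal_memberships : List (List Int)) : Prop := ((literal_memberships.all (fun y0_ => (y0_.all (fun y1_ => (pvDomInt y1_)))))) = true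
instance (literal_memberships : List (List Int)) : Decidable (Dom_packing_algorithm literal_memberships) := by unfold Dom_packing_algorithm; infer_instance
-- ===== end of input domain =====

-- B replaces A's pop(0)/pop() consumption of the sorted (index,size) list by a two-pointer
-- walk over a sorted index array (objective: alternative consumption mechanism, same cost measured).
-- NOTE: Python A mutates its argument (pop(0)); B does not — the equivalence proved is about the RETURN value only.

-- ===== PORT A =====
-- the while-loop of A: state = (size_sorted_arr, packed_literal_array, masks, current_mask_position);
-- pop(0) = take the head, pop() = take the last element; mems[i] / masks[i]=v are in-range, pyGetD/pySetD are exact there.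
-- The Nat argument is fuel (initialised to the list length, which bounds the iteration count) making the
-- recursion structural; the fuel-exhausted arm is unreachable.
def packA_loop (mems : List (List Int)) :
    Nat → List (Int × Int) → List (List (List Int)) → List (Int × Int) → Int →
    List (List (List Int)) × List (Int × Int)
  | _, [], packed, masks, _ => (packed, masks)
  | _, [(ri, _)], packed, masks, pos =>
      -- the trailing 'if size_sorted_arr:' branch
      let rem := PySem.List.pyGetD mems ri []
      (packed ++ [[[ri + 1], rem]],
       PySem.List.pySetD masks (ri + 1) (pos, pos + PySem.List.len rem - 1))
  | 0, _ :: _ :: _, packed, masks, _ => (packed, masks)   -- unreachable: fuel ≥ list length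
  | fuel + 1, (si, _) :: p :: rest, packed, masks, pos =>
      let small := PySem.List.pyGetD mems si []
      let bi := ((p :: rest).getLast (List.cons_ne_nil p rest)).1
      let big := PySem.List.pyGetD mems bi []
      packA_loop mems fuel ((p :: rest).dropLast)
        (packed ++ [[[bi + 1, si + 1], big ++ small]])
        (PySem.List.pySetD
          (PySem.List.pySetD masks (bi + 1) (pos, pos + PySem.List.len big - 1))
          (si + 1)
          (pos + PySem.List.len big, pos + PySem.List.len big + PySem.List.len small - 1))
        (pos + PySem.List.len big + PySem.List.len small)

def packing_algorithm (literal_memberships : List (List Int)) :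
    List (List (List Int)) × (List (Int × Int)) :=
  match literal_memberships with
  | [] => ([], [])   -- literal_memberships.pop(0) raises IndexError here; excluded by Pre_
  | _ :: mems =>     -- pop(0) removed the head
      let size_unsorted_arr := mems.map (fun i => PySem.List.len i)
      let size_sorted_arr :=
        PySem.List.sorted (PySem.List.enumerate size_unsorted_arr) (fun x => x.2)
      packA_loop mems size_sorted_arr.length size_sorted_arr []
        (List.replicate (mems.length + 1) ((0 : Int), (0 : Int))) 0

-- ===== PORT B =====
-- the two-pointer while-loop of B: reads order[lo], order[hi], moves lo up and hi down.
-- Fuel (initialised to len(order), a bound on the iteration count) makes the recursion structural.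
def packB_loop (order : List Int) (mems : List (List Int)) :
    Nat → Int → Int → List (List (List Int)) → List (Int × Int) → Int →
    List (List (List Int)) × List (Int × Int)
  | fuel, lo, hi, packed, masks, pos =>
    if lo < hi then
      match fuel with
      | 0 => (packed, masks)   -- unreachable: fuel bounds the iteration count
      | fuel' + 1 =>
        let si := PySem.List.pyGetD order lo 0
        let bi := PySem.List.pyGetD order hi 0
        let small := PySem.List.pyGetD mems si []
        let big := PySem.List.pyGetD mems bi []
        packB_loop order mems fuel' (lo + 1) (hi - 1)
          (packed ++ [[[bi + 1, si + 1], big ++ small]])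
          (PySem.List.pySetD
            (PySem.List.pySetD masks (bi + 1) (pos, pos + PySem.List.len big - 1))
            (si + 1)
            (pos + PySem.List.len big, pos + PySem.List.len big + PySem.List.len small - 1))
          (pos + PySem.List.len big + PySem.List.len small)
    else if lo = hi then
      let i := PySem.List.pyGetD order lo 0
      let rem := PySem.List.pyGetD mems i []
      (packed ++ [[[i + 1], rem]],
       PySem.List.pySetD masks (i + 1) (pos, pos + PySem.List.len rem - 1))
    else (packed, masks)

def packing_algorithm_alt (literal_memberships : List (List Int)) :
    List (List (List Int)) × (List (Int × Int)) :=
  let mems := PySem.List.slice literal_memberships (some 1) none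
  let n := PySem.List.len mems
  let order := PySem.List.sorted (PySem.List.pyRange 0 n 1)
                 (fun i => PySem.List.len (PySem.List.pyGetD mems i []))
  packB_loop order mems order.length 0 (n - 1) []
    (List.replicate (mems.length + 1) ((0 : Int), (0 : Int))) 0

-- ===== PRECONDITION & SPEC =====
-- Pre_ excludes only the empty list, on which A raises IndexError (pop from empty list)
def Pre_packing_algorithm (literal_memberships : List (List Int)) : Prop :=
  literal_memberships ≠ []
instance (literal_memberships : List (List Int)) : Decidable (Pre_packing_algorithm literal_memberships) := by unfold Pre_packing_algorithm; infer_instance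
def pvWitness_packing_algorithm : List (List Int) := [[1], [2, 3]]

-- On the empty list A raises IndexError (pop from empty list) while B returns ([], [(0, 0)]).
def Raises_packing_algorithm (literal_memberships : List (List Int)) : Prop :=
  literal_memberships = []
instance (literal_memberships : List (List Int)) : Decidable (Raises_packing_algorithm literal_memberships) := by unfold Raises_packing_algorithm; infer_instance
def pvRaiseWitness_packing_algorithm : List (List Int) := []
def pvRaiseWitnessOut_packing_algorithm : List (List (List Int)) × (List (Int × Int)) := ([], [(0, 0)])

def Spec_packing_algorithm (literal_memberships : List (List Int)) (out : List (List (List Int)) × (List (Int × Int))) : Prop := out = packing_algorithm_alt literal_memberships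
instance (literal_memberships : List (List Int)) (out : List (List (List Int)) × (List (Int × Int))) : Decidable (Spec_packing_algorithm literal_memberships out) := by unfold Spec_packing_algorithm; infer_instance

-- ===== CLAIM (what is proved, stated in full; the proofs are below) =====
def Claim_equal_packing_algorithm : Prop := ∀ (literal_memberships : List (List Int)), Dom_packing_algorithm literal_memberships → Pre_packing_algorithm literal_memberships → Spec_packing_algorithm literal_memberships (packing_algorithm literal_memberships)
def Claim_raises_packing_algorithm : Prop := (∀ (literal_memberships : List (List Int)), Dom_packing_algorithm literal_memberships → Raises_packing_algorithm literal_memberships → ¬ Pre_packing_algorithm literal_memberships) ∧ (Dom_packing_algorithm (pvRaiseWitness_packing_algorithm) ∧ Raises_packing_algorithm (pvRaiseWitness_packing_algorithm) ∧ packing_algorithm_alt (pvRaiseWitness_packing_algorithm) = pvRaiseWitnessOut_packing_algorithm)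

-- ===== LEMMAS AND PROOFS =====

-- stable insertion commutes with map when the comparison factors through the map
theorem insertBy_map {α β : Type} (f : α → β) (b : β → β → Bool) (b' : α → α → Bool)
    (hb : ∀ a c, b (f a) (f c) = b' a c) (x : α) (ys : List α) :
    PySem.List.insertBy b (f x) (ys.map f) = (PySem.List.insertBy b' x ys).map f := by
  induction ys with
  | nil => simp [PySem.List.insertBy]
  | cons y ys ih =>
      simp only [List.map_cons, PySem.List.insertBy, hb]
      split_ifs <;> simp [ih]

theorem foldl_insertBy_map {α β : Type} (f : α → β) (b : β → β → Bool) (b' : α → α → Bool)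
    (hb : ∀ a c, b (f a) (f c) = b' a c) (l : List α) (acc : List α) :
    l.foldl (fun acc x => PySem.List.insertBy b (f x) acc) (acc.map f)
      = (l.foldl (fun acc x => PySem.List.insertBy b' x acc) acc).map f := by
  induction l generalizing acc with
  | nil => rfl
  | cons x l ih =>
      simp only [List.foldl_cons]
      rw [insertBy_map f b b' hb, ih]

-- sorting a mapped list by a key that reads through the map = mapping the sorted originals
theorem sorted_map {α β κ : Type} [LT κ] [DecidableLT κ] (f : α → β) (key : β → κ) (l : List α) :
    PySem.List.sorted (l.map f) key = (PySem.List.sorted l (fun x => key (f x))).map f := by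
  rw [PySem.List.sorted_eq_foldl_insertBy, PySem.List.sorted_eq_foldl_insertBy, List.foldl_map]
  exact foldl_insertBy_map f _ _ (fun a c => rfl) l []

-- the central loop correspondence: A's pop-front/pop-back loop over the window 'o' of the
-- sorted order equals B's two-pointer loop over the whole order with lo/hi framing that window
theorem loop_eq (mems : List (List Int)) (g : Int → Int) :
    ∀ (n fa fb : Nat) (o u v : List Int) (packed : List (List (List Int)))
      (masks : List (Int × Int)) (pos : Int), o.length = n → n ≤ fa → n ≤ fb →
      packB_loop (u ++ o ++ v) mems fb ((u.length : Int))
        ((u.length : Int) + (o.length : Int) - 1) packed masks pos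
        = packA_loop mems fa (o.map (fun j => (j, g j))) packed masks pos := by
  intro n
  induction n using Nat.strong_induction_on with
  | _ n ih =>
    intro fa fb o u v packed masks pos hlen hfa hfb
    match o with
    | [] =>
        rw [packB_loop.eq_def]
        dsimp only
        simp only [List.map_nil, List.length_nil]
        rw [if_neg (by push_cast; omega), if_neg (by push_cast; omega)]
        cases fa <;> rfl
    | [r] =>
        rw [packB_loop.eq_def]
        dsimp only
        rw [if_neg (by simp), if_pos (by simp)]
        have hr : PySem.List.pyGetD (u ++ [r] ++ v) ((u.length : Int)) 0 = r := by
          rw [PySem.List.pyGetD_natCast]; simp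
        simp only [hr, List.map_cons, List.map_nil]
        cases fa <;> rfl
    | a :: p0 :: t =>
        have hne : (p0 :: t) ≠ [] := List.cons_ne_nil p0 t
        set z := (p0 :: t).getLast hne with hz
        set M := (p0 :: t).dropLast with hM
        have hsplit : p0 :: t = M ++ [z] := (List.dropLast_append_getLast hne).symm
        have hMlen : M.length = t.length := by rw [hM]; simp
        have holen : (a :: p0 :: t).length = M.length + 2 := by simp [hMlen]
        obtain ⟨fa', rfl⟩ : ∃ fa', fa = fa' + 1 := by
          cases fa with
          | zero => omega
          | succ k => exact ⟨k, rfl⟩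
        obtain ⟨fb', rfl⟩ : ∃ fb', fb = fb' + 1 := by
          cases fb with
          | zero => omega
          | succ k => exact ⟨k, rfl⟩
        -- B side: loop branch taken
        rw [packB_loop]
        rw [if_pos (by simp only [holen]; push_cast; omega)]
        have hsi : PySem.List.pyGetD (u ++ (a :: p0 :: t) ++ v) ((u.length : Int)) 0 = a := by
          rw [PySem.List.pyGetD_natCast]; simp
        have hbi : PySem.List.pyGetD (u ++ (a :: p0 :: t) ++ v)
            ((u.length : Int) + ((a :: p0 :: t).length : Int) - 1) 0 = z := by
          have horder2 : u ++ (a :: p0 :: t) ++ v = (u ++ a :: M) ++ ([z] ++ v) := by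
            rw [hsplit]; simp
          have hidx : (u.length : Int) + ((a :: p0 :: t).length : Int) - 1
              = (((u ++ a :: M).length : Nat) : Int) := by
            simp only [holen, List.length_append, List.length_cons]; push_cast; ring
          rw [horder2, hidx, PySem.List.pyGetD_natCast]
          simp
        simp only [hsi, hbi]
        -- A side: unfold one step of packA_loop
        have hmapo : (a :: p0 :: t).map (fun j => (j, g j))
            = (a, g a) :: (M.map (fun j => (j, g j)) ++ [(z, g z)]) := by
          rw [show (p0 :: t) = M ++ [z] from hsplit]; simp
        obtain ⟨p', rest', hpr⟩ : ∃ p' rest',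
            M.map (fun j => (j, g j)) ++ [(z, g z)] = p' :: rest' := by
          cases hMM : M.map (fun j => (j, g j)) with
          | nil => exact ⟨_, _, rfl⟩
          | cons q qs => exact ⟨_, _, rfl⟩
        rw [hmapo]
        rw [hpr]
        rw [packA_loop]
        have hlast : ((p' :: rest').getLast (List.cons_ne_nil p' rest')) = (z, g z) := by
          have h1 : (p' :: rest').getLast? = some (z, g z) := by
            rw [← hpr]; exact List.getLast?_concat
          rw [List.getLast?_eq_some_getLast (List.cons_ne_nil p' rest')] at h1
          exact Option.some.inj h1
        have hdrop : (p' :: rest').dropLast = M.map (fun j => (j, g j)) := by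
          rw [← hpr]; exact List.dropLast_concat
        rw [hlast, hdrop]
        -- recursive call: ih with o := M, u := u ++ [a], v := z :: v
        have e1 : (u.length : Int) + 1 = (((u ++ [a]).length : Nat) : Int) := by
          simp
        have e2 : (u.length : Int) + ((a :: p0 :: t).length : Int) - 1 - 1
            = (((u ++ [a]).length : Nat) : Int) + ((M.length : Nat) : Int) - 1 := by
          simp only [holen, List.length_append, List.length_cons, List.length_nil]
          push_cast; ring
        have e3 : u ++ (a :: p0 :: t) ++ v = (u ++ [a]) ++ M ++ ([z] ++ v) := by
          rw [hsplit]; simp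
        rw [e3, e1, e2]
        exact ih M.length (by omega) fa' fb' M (u ++ [a]) ([z] ++ v) _ _ _ rfl
          (by omega) (by omega)

-- ===== VERDICT (by name: the statement is the Claim_ definition above) =====
theorem packing_algorithm_raises : Claim_raises_packing_algorithm := by
  unfold Claim_raises_packing_algorithm
  refine ⟨fun lm _ h => ?_, by decide, rfl, ?_⟩
  · intro hp; exact hp h
  · show packing_algorithm_alt [] = ([], [(0, 0)])
    rw [packing_algorithm_alt]
    rfl

theorem packing_algorithm_spec : Claim_equal_packing_algorithm := by
  intro lm hdom hpre
  match lm with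
  | [] => exact absurd hpre (packing_algorithm_raises.1 [] hdom rfl)
  | x :: mems =>
    show packing_algorithm (x :: mems) = packing_algorithm_alt (x :: mems)
    have hmems : PySem.List.slice (x :: mems) (some 1) none = mems := by
      rw [PySem.List.slice_from_one]; rfl
    have hen : PySem.List.enumerate (mems.map (fun i => PySem.List.len i))
        = (PySem.List.pyRange 0 (PySem.List.len mems) 1).map
            (fun j => (j, PySem.List.len (PySem.List.pyGetD mems j []))) := by
      rw [PySem.List.enumerate_eq_map_pyRange (mems.map (fun i => PySem.List.len i))
            (PySem.List.len ([] : List Int))]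
      have hl : PySem.List.len (mems.map (fun i => PySem.List.len i)) = PySem.List.len mems := by
        simp [PySem.List.len_eq]
      rw [hl]
      congr 1
      funext j
      rw [PySem.List.pyGetD_map (fun i => PySem.List.len i) mems j []]
    have hsort : PySem.List.sorted
          (PySem.List.enumerate (mems.map (fun i => PySem.List.len i))) (fun x => x.2)
        = (PySem.List.sorted (PySem.List.pyRange 0 (PySem.List.len mems) 1)
            (fun i => PySem.List.len (PySem.List.pyGetD mems i []))).map
            (fun j => (j, PySem.List.len (PySem.List.pyGetD mems j []))) := by
      rw [hen, sorted_map]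
    have horder_len : (PySem.List.sorted (PySem.List.pyRange 0 (PySem.List.len mems) 1)
        (fun i => PySem.List.len (PySem.List.pyGetD mems i []))).length = mems.length := by
      rw [PySem.List.length_sorted, PySem.List.length_pyRange_one]
      simp [PySem.List.len_eq]
    simp only [packing_algorithm, packing_algorithm_alt, hmems, hsort]
    have hmain := loop_eq mems (fun j => PySem.List.len (PySem.List.pyGetD mems j []))
      (PySem.List.sorted (PySem.List.pyRange 0 (PySem.List.len mems) 1)
        (fun i => PySem.List.len (PySem.List.pyGetD mems i []))).length
      ((PySem.List.sorted (PySem.List.pyRange 0 (PySem.List.len mems) 1)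
          (fun i => PySem.List.len (PySem.List.pyGetD mems i []))).map
          (fun j => (j, PySem.List.len (PySem.List.pyGetD mems j [])))).length
      (PySem.List.sorted (PySem.List.pyRange 0 (PySem.List.len mems) 1)
        (fun i => PySem.List.len (PySem.List.pyGetD mems i []))).length
      (PySem.List.sorted (PySem.List.pyRange 0 (PySem.List.len mems) 1)
        (fun i => PySem.List.len (PySem.List.pyGetD mems i []))) [] []
      [] (List.replicate (mems.length + 1) ((0 : Int), (0 : Int))) 0
      rfl (by simp) (le_refl _)
    simp only [List.nil_append, List.append_nil, List.length_nil, Nat.cast_zero,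
      zero_add, horder_len] at hmain
    rw [← hmain]
    congr 1
    simp [PySem.List.len_eq]
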